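-- pv_equiv track=rewrite | github.com/Lawrence7y/jianying-beat-autocut | jianying_beat_autocut.py | split_intervals_by_max_duration
-- ===== SOURCE A (Python) =====
-- from typing import Callable, Sequence
--
-- def split_intervals_by_max_duration(
--     intervals_us: Sequence[tuple[int, int]],
--     max_duration_us: int,
--     min_duration_us: int = 1,
-- ) -> list[tuple[int, int]]:
--     max_us = int(max_duration_us)
--     if max_us <= 0:
--         return [(int(s), int(e)) for s, e in intervals_us if int(e) - int(s) >= min_duration_us]
--     if max_us < min_duration_us:
--         max_us = min_duration_us
--
--     out: list[tuple[int, int]] = []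
--     for raw_start, raw_end in intervals_us:
--         start = int(raw_start)
--         end = int(raw_end)
--         if end - start < min_duration_us:
--             continue
--         while (end - start) > max_us:
--             cut = start + max_us
--             if cut - start >= min_duration_us:
--                 out.append((start, cut))
--             start = cut
--         if end - start >= min_duration_us:
--             out.append((start, end))
--     return out
-- ===== SOURCE B (Python) =====
-- def split_intervals_by_max_duration(intervals_us, max_duration_us, min_duration_us=1):
--     max_us = int(max_duration_us)
--     if max_us <= 0:
--         return [(int(s), int(e)) for s, e in intervals_us if int(e) - int(s) >= min_duration_us]
--     step = max(max_us, min_duration_us)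
--     out = []
--     for raw_start, raw_end in intervals_us:
--         start, end = int(raw_start), int(raw_end)
--         # boundary table: every cut point up front, then one uniform pairwise filter
--         bounds = list(range(start, end, step)) or [start]
--         bounds.append(end)
--         out.extend((a, b) for a, b in zip(bounds, bounds[1:]) if b - a >= min_duration_us)
--     return out
-- ===== Notes on version B (the rewrite author's own statement) =====
-- stated objective: alternative
-- what changed: Replaces A's mutating front-cutting while loop (with its per-interval skip guard and separate tail check) by an up-front boundary table built with range(start, end, step) and a single uniform pairwise zip+filter pass; since full pieces have length step >= min, the one filter reproduces all of A's per-piece checks.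
import Mathlib
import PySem

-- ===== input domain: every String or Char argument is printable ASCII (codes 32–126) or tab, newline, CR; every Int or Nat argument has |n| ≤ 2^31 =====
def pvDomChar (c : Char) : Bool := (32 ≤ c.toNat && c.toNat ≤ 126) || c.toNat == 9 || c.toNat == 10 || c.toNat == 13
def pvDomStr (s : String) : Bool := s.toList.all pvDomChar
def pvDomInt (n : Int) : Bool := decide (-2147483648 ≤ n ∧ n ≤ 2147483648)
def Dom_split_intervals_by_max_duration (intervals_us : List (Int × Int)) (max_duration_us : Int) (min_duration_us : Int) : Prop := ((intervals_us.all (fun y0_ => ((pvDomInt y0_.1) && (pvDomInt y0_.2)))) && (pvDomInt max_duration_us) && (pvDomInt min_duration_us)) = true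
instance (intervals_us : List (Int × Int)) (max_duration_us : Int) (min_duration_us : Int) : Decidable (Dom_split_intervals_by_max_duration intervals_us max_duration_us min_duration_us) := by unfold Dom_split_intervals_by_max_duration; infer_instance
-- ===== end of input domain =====

-- B replaces A's front-cutting while loop by an up-front boundary table (range with step)
-- and one uniform pairwise filter (alternative decomposition, same cost).

-- ===== PORT A =====
-- the while loop of A: peels (start, start+max_us) chunks off the front; max_us > 0 guarantees termination
def pyAWhile (start end_ max_us min_ : Int) (out : List (Int × Int)) (h : 0 < max_us) : List (Int × Int) :=
  if end_ - start > max_us then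
    let cut := start + max_us
    let out' := if cut - start ≥ min_ then out ++ [(start, cut)] else out
    pyAWhile cut end_ max_us min_ out' h
  else
    if end_ - start ≥ min_ then out ++ [(start, end_)] else out
termination_by (end_ - start).toNat
decreasing_by omega

def split_intervals_by_max_duration (intervals_us : List (Int × Int)) (max_duration_us : Int) (min_duration_us : Int) : List (Int × Int) :=
  let max_us := max_duration_us
  if hle : max_us ≤ 0 then
    intervals_us.filter (fun p => decide (p.2 - p.1 ≥ min_duration_us))
  else
    let max_us := if max_us < min_duration_us then min_duration_us else max_us
    intervals_us.foldl (fun out p =>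
      let start := p.1
      let end_ := p.2
      if end_ - start < min_duration_us then out
      else pyAWhile start end_ max_us min_duration_us out (by simp only [max_us]; omega)) []

-- ===== PORT B =====
def split_intervals_by_max_duration_alt (intervals_us : List (Int × Int)) (max_duration_us : Int) (min_duration_us : Int) : List (Int × Int) :=
  let max_us := max_duration_us
  if max_us ≤ 0 then
    intervals_us.filter (fun p => decide (p.2 - p.1 ≥ min_duration_us))
  else
    let step := max max_us min_duration_us
    intervals_us.foldl (fun out p =>
      let start := p.1
      let end_ := p.2
      let r := PySem.List.pyRange start end_ step
      let bounds := (if r.isEmpty then [start] else r) ++ [end_]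
      out ++ (bounds.zip bounds.tail).filter (fun q => decide (q.2 - q.1 ≥ min_duration_us))) []

-- ===== PRECONDITION & SPEC =====
def Spec_split_intervals_by_max_duration (intervals_us : List (Int × Int)) (max_duration_us : Int) (min_duration_us : Int) (out : List (Int × Int)) : Prop := out = split_intervals_by_max_duration_alt intervals_us max_duration_us min_duration_us
instance (intervals_us : List (Int × Int)) (max_duration_us : Int) (min_duration_us : Int) (out : List (Int × Int)) : Decidable (Spec_split_intervals_by_max_duration intervals_us max_duration_us min_duration_us out) := by unfold Spec_split_intervals_by_max_duration; infer_instance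

-- ===== CLAIM =====
def Claim_equal_split_intervals_by_max_duration : Prop := ∀ (intervals_us : List (Int × Int)) (max_duration_us : Int) (min_duration_us : Int), Dom_split_intervals_by_max_duration intervals_us max_duration_us min_duration_us → Spec_split_intervals_by_max_duration intervals_us max_duration_us min_duration_us (split_intervals_by_max_duration intervals_us max_duration_us min_duration_us)

-- ===== LEMMAS AND PROOFS =====

-- the per-interval output of B's boundary-table step
def pvPairs (start end_ step min_ : Int) : List (Int × Int) :=
  let r := PySem.List.pyRange start end_ step
  let bounds := (if r.isEmpty then [start] else r) ++ [end_]
  (bounds.zip bounds.tail).filter (fun q => decide (q.2 - q.1 ≥ min_))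

lemma pyRange_pos_nil (a b s : Int) (hs : 0 < s) (h : b ≤ a) :
    PySem.List.pyRange a b s = [] := by
  rw [PySem.List.pyRange_of_pos _ _ hs]
  simp [show ¬ a < b by omega]

lemma pyRange_pos_cons (a b s : Int) (hs : 0 < s) (h : a < b) :
    PySem.List.pyRange a b s = a :: PySem.List.pyRange (a + s) b s := by
  rw [PySem.List.pyRange_of_pos _ _ hs, PySem.List.pyRange_of_pos _ _ hs]
  have hdiv : (b - a + s - 1) / s = (b - a - 1) / s + 1 := by
    have := Int.add_mul_ediv_right (b - a - 1) 1 (by omega : s ≠ 0)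
    have harg : b - a - 1 + 1 * s = b - a + s - 1 := by ring
    rw [harg] at this; omega
  have hnn : 0 ≤ (b - a - 1) / s := Int.ediv_nonneg (by omega) (by omega)
  by_cases h2 : a + s < b
  · have harg2 : b - (a + s) + s - 1 = b - a - 1 := by ring
    have hcount : (b - a + s - 1) / s = (b - (a + s) + s - 1) / s + 1 := by
      rw [harg2]; exact hdiv
    simp only [if_pos h, if_pos h2, hcount]
    rw [show ((b - (a+s) + s - 1) / s + 1).toNat = ((b - (a+s) + s - 1) / s).toNat + 1 by
      rw [harg2]; omega]
    rw [List.range_succ_eq_map, List.map_cons, List.map_map]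
    refine congrArg₂ List.cons (by norm_num) ?_
    apply List.map_congr_left
    intro i _
    simp only [Function.comp_apply]
    push_cast; ring
  · have hz : (b - a - 1) / s = 0 := by
      apply Int.ediv_eq_zero_of_lt (by omega) (by omega)
    simp only [if_pos h, if_neg h2, hdiv, hz]
    simp
lemma pvPairs_base (start end_ step min_ : Int) (hs : 0 < step)
    (hle : end_ - start ≤ step) :
    pvPairs start end_ step min_ =
      if end_ - start ≥ min_ then [(start, end_)] else [] := by
  have hbounds : (if (PySem.List.pyRange start end_ step).isEmpty then [start]
      else PySem.List.pyRange start end_ step) = [start] := by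
    by_cases h : start < end_
    · rw [pyRange_pos_cons _ _ _ hs h, pyRange_pos_nil _ _ _ hs (by omega)]
      simp
    · rw [pyRange_pos_nil _ _ _ hs (by omega)]
      simp
  simp only [pvPairs, hbounds]
  by_cases hmin : end_ - start ≥ min_ <;> simp [hmin, List.filter]

lemma pvPairs_step (start end_ step min_ : Int) (hs : 0 < step) (hmin : min_ ≤ step)
    (hgt : end_ - start > step) :
    pvPairs start end_ step min_ =
      (start, start + step) :: pvPairs (start + step) end_ step min_ := by
  have h1 : start < end_ := by omega
  have h2 : start + step < end_ := by omega
  rw [pvPairs, pyRange_pos_cons _ _ _ hs h1]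
  rw [pvPairs]
  rw [pyRange_pos_cons (start + step) _ _ hs h2]
  simp only [List.isEmpty_cons, if_neg (by simp : ¬ (false = true)), List.cons_append,
    List.tail_cons, List.zip_cons_cons, List.filter_cons]
  simp [hmin]

lemma while_eq (step min_ : Int) (h : 0 < step) (hmin : min_ ≤ step)
    (start end_ : Int) (out : List (Int × Int)) :
    pyAWhile start end_ step min_ out h = out ++ pvPairs start end_ step min_ := by
  fun_induction pyAWhile start end_ step min_ out h
  case case1 =>
    rename_i s o hgt cut out1 ih
    rw [ih, pvPairs_step s end_ _ _ h hmin (by omega)]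
    simp only [out1, cut]
    simp [hmin]
  case case2 =>
    rename_i s o hgt hge
    rw [pvPairs_base s end_ _ _ h (by omega)]
    simp [hge]
  case case3 =>
    rename_i s o hgt hge
    rw [pvPairs_base s end_ _ _ h (by omega)]
    simp [hge]

-- ===== VERDICT =====
theorem split_intervals_by_max_duration_spec : Claim_equal_split_intervals_by_max_duration := by
  intro intervals_us maxd mind _
  unfold Spec_split_intervals_by_max_duration
  unfold split_intervals_by_max_duration split_intervals_by_max_duration_alt
  by_cases hle : maxd ≤ 0
  · simp [hle]
  · simp only [hle, dite_false, if_false]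
    congr 1
    funext out p
    have hstep : (if maxd < mind then mind else maxd) = max maxd mind := by
      split_ifs with h <;> omega
    have hpos : 0 < max maxd mind := by
      have : ¬ maxd ≤ 0 := hle; omega
    have hmin : mind ≤ max maxd mind := le_max_right _ _
    simp only [hstep]
    by_cases hlen : p.2 - p.1 < mind
    · have : pvPairs p.1 p.2 (max maxd mind) mind = [] := by
        rw [pvPairs_base _ _ _ _ hpos (by omega)]
        simp [show ¬ p.2 - p.1 ≥ mind by omega]
      simp only [hlen, if_true]
      have h2 : out ++ pvPairs p.1 p.2 (max maxd mind) mind = out := by rw [this]; simp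
      exact h2.symm
    · simp only [hlen, if_false]
      rw [while_eq _ _ hpos hmin]
      rfl
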